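-- pv_equiv track=rewrite | github.com/arcoyk/ml | doc2vec/tag_pred.py | get_tagprobs_all_combis
-- ===== SOURCE A (Python) =====
-- def get_tagprobs_all_combis(tagprobs_devided):
--   rst = [[]]
--   for tagprobs in tagprobs_devided:
--     tmp = list()
--     for r in rst:
--       for tagprob in tagprobs:
--         tmp.append(r + [tagprob])
--     rst = tmp
--   return rst
-- ===== SOURCE B (Python) =====
-- def get_tagprobs_all_combis(tagprobs_devided):
--     if not tagprobs_devided:
--         return [[]]
--     head, rest = tagprobs_devided[0], tagprobs_devided[1:]
--     tails = get_tagprobs_all_combis(rest)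
--     return [[x] + t for x in head for t in tails]
-- ===== Notes on version B (the rewrite author's own statement) =====
-- stated objective: idiomatic
-- what changed: Replaces A's left-to-right accumulator loop (rebuilding the whole partial-combination list for each group with three nested loops) by structural recursion on the group list that prepends each head element to the recursively computed tail combinations.
import Mathlib
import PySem

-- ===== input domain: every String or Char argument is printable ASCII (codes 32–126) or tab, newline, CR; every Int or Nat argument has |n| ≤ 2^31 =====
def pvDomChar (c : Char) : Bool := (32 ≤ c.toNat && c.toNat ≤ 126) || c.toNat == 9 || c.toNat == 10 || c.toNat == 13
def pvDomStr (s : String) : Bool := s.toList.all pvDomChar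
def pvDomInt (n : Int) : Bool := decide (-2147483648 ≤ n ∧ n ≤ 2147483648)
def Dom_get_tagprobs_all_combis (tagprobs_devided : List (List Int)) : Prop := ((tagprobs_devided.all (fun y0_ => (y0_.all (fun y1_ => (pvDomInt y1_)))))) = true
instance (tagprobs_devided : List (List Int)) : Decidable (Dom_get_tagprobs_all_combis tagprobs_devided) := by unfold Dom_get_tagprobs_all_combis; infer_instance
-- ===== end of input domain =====

-- B replaces A's triple-nested accumulator loop by structural recursion on the group list (idiomatic, same cost).


-- ===== PORT A =====
-- literal port: 'rst = [[]]'; outer for over tagprobs_devided, middle for over rst,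
-- inner for over tagprobs appending r + [tagprob] to tmp; rst = tmp after each group.
def get_tagprobs_all_combis (tagprobs_devided : List (List Int)) : List (List Int) :=
  tagprobs_devided.foldl
    (fun rst tagprobs =>
      rst.foldl
        (fun tmp r =>
          tagprobs.foldl (fun tmp tagprob => tmp ++ [r ++ [tagprob]]) tmp)
        [])
    [[]]

-- ===== PORT B =====
-- literal port of Source B: structural recursion, prepend each head element to each tail combination.
def get_tagprobs_all_combis_alt : List (List Int) → List (List Int)
  | [] => [[]]
  | head :: rest =>
    (head.flatMap (fun x => (get_tagprobs_all_combis_alt rest).map (fun t => [x] ++ t)))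

-- ===== PRECONDITION & SPEC =====
def Spec_get_tagprobs_all_combis (tagprobs_devided : List (List Int)) (out : List (List Int)) : Prop := out = get_tagprobs_all_combis_alt tagprobs_devided
instance (tagprobs_devided : List (List Int)) (out : List (List Int)) : Decidable (Spec_get_tagprobs_all_combis tagprobs_devided out) := by unfold Spec_get_tagprobs_all_combis; infer_instance

-- ===== CLAIM (what is proved, stated in full; the proofs are below) =====
def Claim_equal_get_tagprobs_all_combis : Prop := ∀ (tagprobs_devided : List (List Int)), Dom_get_tagprobs_all_combis tagprobs_devided → Spec_get_tagprobs_all_combis tagprobs_devided (get_tagprobs_all_combis tagprobs_devided)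

-- ===== LEMMAS AND PROOFS =====

-- one step of A's outer loop, in closed form
theorem stepA_eq (acc : List (List Int)) (g : List Int) :
    acc.foldl (fun tmp r => g.foldl (fun tmp tagprob => tmp ++ [r ++ [tagprob]]) tmp) []
      = acc.flatMap (fun r => g.map (fun tp => r ++ [tp])) := by
  have h : ∀ (init : List (List Int)),
      acc.foldl (fun tmp r => g.foldl (fun tmp tagprob => tmp ++ [r ++ [tagprob]]) tmp) init
        = init ++ acc.flatMap (fun r => g.map (fun tp => r ++ [tp])) := by
    induction acc with
    | nil => simp
    | cons r rs ih =>
      intro init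
      rw [List.foldl_cons, PySem.List.foldl_append_singleton_eq_map, ih]
      simp [List.append_assoc]
  simpa using h []

-- A's whole fold from any accumulator, in terms of B
theorem foldA_eq (gs : List (List Int)) : ∀ (acc : List (List Int)),
    gs.foldl
      (fun rst tagprobs =>
        rst.foldl
          (fun tmp r => tagprobs.foldl (fun tmp tagprob => tmp ++ [r ++ [tagprob]]) tmp)
          [])
      acc
      = acc.flatMap (fun r => (get_tagprobs_all_combis_alt gs).map (fun t => r ++ t)) := by
  induction gs with
  | nil => intro acc; simp [get_tagprobs_all_combis_alt]
  | cons g gs ih =>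
    intro acc
    rw [List.foldl_cons, stepA_eq, ih]
    simp [get_tagprobs_all_combis_alt, List.flatMap_map, List.map_flatMap,
      List.flatMap_assoc, List.map_map, Function.comp_def]

-- ===== VERDICT (by name: the statement is the Claim_ definition above) =====
theorem get_tagprobs_all_combis_spec : Claim_equal_get_tagprobs_all_combis := by
  intro l _
  show _ = _
  unfold get_tagprobs_all_combis
  rw [foldA_eq]
  simp
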